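-- pv_equiv track=rewrite | github.com/enjoy-digital/litejesd204b | test/model/transport.py | long_test_pattern
-- ===== SOURCE A (Python) =====
-- def long_test_pattern(nconverters, nbits, samples_per_frame, frame_per_multiframe, repeats):
--     """
--     Generates the long transport layer test pattern:
--     - duration of max(nconverters*samples_per_frame+2, 4) rounded up to lowest
--       number of full multiframes.
--     - repeated continuously
--     - frame 0: Converter ID + 1
--     - frame 1: Samples ID + 1
--     - frame N: MSB bit set to 1
--
--     limitations:
--     - control and tail bits no supported
--
--     cf section 5.1.6.3
--     """
--     nframes = min(max(nconverters*samples_per_frame+2, 4), frame_per_multiframe)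
--
--     samples = []
--     for c in range(nconverters):
--         converter_samples = []
--         for r in range(repeats):
--             for f in range(nframes):
--                 for s in range(samples_per_frame):
--                     # converter id + 1
--                     if f == 0:
--                         converter_samples.append(c+1)
--                     # sample id + 1
--                     elif f == 1:
--                         converter_samples.append(s+1)
--                     # sample's msb bit set to 1
--                     else:
--                         converter_samples.append(2**(nbits-1))
--         samples.append(converter_samples)
--     return samples
-- ===== SOURCE B (Python) =====
-- def long_test_pattern(nconverters, nbits, samples_per_frame, frame_per_multiframe, repeats):
--     """Same pattern built by list arithmetic: the per-converter row is
--     (frame-0 piece + shared tail) * repeats, with the shared tail (frame 1's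
--     sample ids and the MSB fill of all later frames) computed once."""
--     nframes = min(max(nconverters*samples_per_frame+2, 4), frame_per_multiframe)
--     if nconverters <= 0 or samples_per_frame <= 0 or repeats <= 0:
--         return [[] for _ in range(nconverters)]
--     tail = []
--     if nframes >= 2:
--         tail += list(range(1, samples_per_frame+1))
--     if nframes >= 3:
--         tail += [2**(nbits-1)] * ((nframes-2)*samples_per_frame)
--     samples = []
--     for c in range(nconverters):
--         head = [c+1]*samples_per_frame if nframes >= 1 else []
--         samples.append((head + tail) * repeats)
--     return samples
-- ===== Notes on version B (the rewrite author's own statement) =====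
-- stated objective: alternative
-- what changed: B eliminates A's four nested loops: it builds the shared tail (frame 1's sample ids and the MSB fill of all later frames) once by list arithmetic, then each converter row is (head + tail) * repeats; it trades two explicit guards for the degenerate empty cases.
-- outside the precondition, e.g. on long_test_pattern(1, 0, 1, 3, 1): A returns [[1, 1, 0.5]], B returns [[1, 1, 0.5]]
import Mathlib
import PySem

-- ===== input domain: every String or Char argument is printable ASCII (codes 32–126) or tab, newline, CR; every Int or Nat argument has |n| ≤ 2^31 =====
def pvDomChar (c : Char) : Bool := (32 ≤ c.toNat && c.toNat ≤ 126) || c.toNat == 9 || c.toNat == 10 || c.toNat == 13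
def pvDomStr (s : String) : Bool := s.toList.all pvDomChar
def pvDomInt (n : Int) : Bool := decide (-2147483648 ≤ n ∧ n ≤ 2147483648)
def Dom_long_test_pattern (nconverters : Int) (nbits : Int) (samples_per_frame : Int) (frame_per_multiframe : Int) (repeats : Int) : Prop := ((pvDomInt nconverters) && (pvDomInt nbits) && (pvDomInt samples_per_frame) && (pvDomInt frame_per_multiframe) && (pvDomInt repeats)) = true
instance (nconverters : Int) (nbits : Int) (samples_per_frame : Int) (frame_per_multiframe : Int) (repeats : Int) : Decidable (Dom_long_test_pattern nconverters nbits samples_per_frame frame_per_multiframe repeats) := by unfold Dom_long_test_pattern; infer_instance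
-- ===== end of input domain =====

-- B replaces A's four nested loops by list arithmetic: each converter row is
-- (frame-0 piece + a shared tail) * repeats, the tail computed once (objective: alternative).

-- ===== PORT A =====
-- '2**(nbits-1)' is ported as '2 ^ (nbits - 1).toNat': exact for nbits ≥ 1; inputs on which
-- Python observes this value with nbits ≤ 0 (a float) are excluded by Pre_ below.
def long_test_pattern (nconverters : Int) (nbits : Int) (samples_per_frame : Int) (frame_per_multiframe : Int) (repeats : Int) : List (List Int) :=
  let nframes := min (max (nconverters * samples_per_frame + 2) 4) frame_per_multiframe
  (PySem.List.pyRange 0 nconverters 1).foldl (fun samples c =>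
    let converter_samples :=
      (PySem.List.pyRange 0 repeats 1).foldl (fun cs _r =>
        (PySem.List.pyRange 0 nframes 1).foldl (fun cs f =>
          (PySem.List.pyRange 0 samples_per_frame 1).foldl (fun cs s =>
            cs ++ [if f = 0 then c + 1 else if f = 1 then s + 1 else 2 ^ (nbits - 1).toNat]) cs) cs) []
    samples ++ [converter_samples]) []

-- ===== PORT B =====
def long_test_pattern_alt (nconverters : Int) (nbits : Int) (samples_per_frame : Int) (frame_per_multiframe : Int) (repeats : Int) : List (List Int) :=
  let nframes := min (max (nconverters * samples_per_frame + 2) 4) frame_per_multiframe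
  if nconverters ≤ 0 ∨ samples_per_frame ≤ 0 ∨ repeats ≤ 0 then
    (PySem.List.pyRange 0 nconverters 1).map (fun _ => ([] : List Int))
  else
    let tail1 : List Int :=
      if 2 ≤ nframes then ([] : List Int) ++ PySem.List.pyRange 1 (samples_per_frame + 1) 1 else []
    let tail : List Int :=
      if 3 ≤ nframes then
        tail1 ++ PySem.List.pyRepeat [2 ^ (nbits - 1).toNat] ((nframes - 2) * samples_per_frame)
      else tail1
    (PySem.List.pyRange 0 nconverters 1).foldl (fun samples c =>
      let head := if 1 ≤ nframes then PySem.List.pyRepeat [c + 1] samples_per_frame else []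
      samples ++ [PySem.List.pyRepeat (head ++ tail) repeats]) []

-- ===== PRECONDITION & SPEC =====
-- Pre_ excludes only the inputs where the MSB pattern value is actually emitted with
-- nbits ≤ 0: there Python's 2**(nbits-1) is a float, so A's result is not a list of ints.
def Pre_long_test_pattern (nconverters : Int) (nbits : Int) (samples_per_frame : Int) (frame_per_multiframe : Int) (repeats : Int) : Prop :=
  1 ≤ nbits ∨ nconverters ≤ 0 ∨ samples_per_frame ≤ 0 ∨ frame_per_multiframe ≤ 2 ∨ repeats ≤ 0
instance (nconverters : Int) (nbits : Int) (samples_per_frame : Int) (frame_per_multiframe : Int) (repeats : Int) : Decidable (Pre_long_test_pattern nconverters nbits samples_per_frame frame_per_multiframe repeats) := by unfold Pre_long_test_pattern; infer_instance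
def pvWitness_long_test_pattern : Int × Int × Int × Int × Int := (2, 4, 2, 5, 2)

def Spec_long_test_pattern (nconverters : Int) (nbits : Int) (samples_per_frame : Int) (frame_per_multiframe : Int) (repeats : Int) (out : List (List Int)) : Prop := out = long_test_pattern_alt nconverters nbits samples_per_frame frame_per_multiframe repeats
instance (nconverters : Int) (nbits : Int) (samples_per_frame : Int) (frame_per_multiframe : Int) (repeats : Int) (out : List (List Int)) : Decidable (Spec_long_test_pattern nconverters nbits samples_per_frame frame_per_multiframe repeats out) := by unfold Spec_long_test_pattern; infer_instance

-- ===== CLAIM (what is proved, stated in full; the proofs are below) =====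
def Claim_equal_long_test_pattern : Prop := ∀ (nconverters : Int) (nbits : Int) (samples_per_frame : Int) (frame_per_multiframe : Int) (repeats : Int), Dom_long_test_pattern nconverters nbits samples_per_frame frame_per_multiframe repeats → Pre_long_test_pattern nconverters nbits samples_per_frame frame_per_multiframe repeats → Spec_long_test_pattern nconverters nbits samples_per_frame frame_per_multiframe repeats (long_test_pattern nconverters nbits samples_per_frame frame_per_multiframe repeats)

-- ===== LEMMAS AND PROOFS =====

-- the per-frame block piece A emits for frame f
def pvPiece (c msb spf : Int) (f : Int) : List Int :=
  if f = 0 then PySem.List.pyRepeat [c + 1] spf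
  else if f = 1 then PySem.List.pyRange 1 (spf + 1) 1
  else PySem.List.pyRepeat [msb] spf

-- A's inner sample loop for one frame equals appending that frame's piece
lemma sample_loop_eq (c msb spf : Int) (f : Int) (cs : List Int) :
    (PySem.List.pyRange 0 spf 1).foldl (fun cs s =>
      cs ++ [if f = 0 then c + 1 else if f = 1 then s + 1 else msb]) cs
    = cs ++ pvPiece c msb spf f := by
  rw [PySem.List.foldl_append_singleton_eq_map]
  unfold pvPiece
  split_ifs with h0 h1
  · simp [List.map_const', PySem.List.length_pyRange_one, PySem.List.pyRepeat_singleton]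
  · congr 1
    simp only [PySem.List.pyRange_one, List.map_map]
    have h2 : spf + 1 - 1 = spf := by ring
    have h3 : spf - 0 = spf := by ring
    rw [h2, h3]
    apply List.map_congr_left
    intro k _
    simp; omega
  · simp [List.map_const', PySem.List.length_pyRange_one, PySem.List.pyRepeat_singleton]

-- repeating a block n times by a fold equals list multiplication
lemma rep_loop_eq (L : List Int) (reps : Int) (init : List Int) :
    (PySem.List.pyRange 0 reps 1).foldl (fun cs _ => cs ++ L) init
    = init ++ PySem.List.pyRepeat L reps := by
  rw [PySem.List.foldl_append_eq_flatMap (g := fun _ => L)]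
  congr 1
  have hlen : (PySem.List.pyRange 0 reps 1).length = reps.toNat := by
    simp [PySem.List.length_pyRange_one]
  simp [List.flatMap_def, List.map_const', hlen, PySem.List.pyRepeat]

-- one converter of A equals the repeated flat block
lemma converter_eq (c msb spf nframes reps : Int) :
    (PySem.List.pyRange 0 reps 1).foldl (fun cs _r =>
        (PySem.List.pyRange 0 nframes 1).foldl (fun cs f =>
          (PySem.List.pyRange 0 spf 1).foldl (fun cs s =>
            cs ++ [if f = 0 then c + 1 else if f = 1 then s + 1 else msb]) cs) cs) []
    = PySem.List.pyRepeat ((PySem.List.pyRange 0 nframes 1).flatMap (pvPiece c msb spf)) reps := by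
  have hframeA : ∀ cs : List Int,
      (PySem.List.pyRange 0 nframes 1).foldl (fun cs f =>
        (PySem.List.pyRange 0 spf 1).foldl (fun cs s =>
          cs ++ [if f = 0 then c + 1 else if f = 1 then s + 1 else msb]) cs) cs
      = cs ++ (PySem.List.pyRange 0 nframes 1).flatMap (pvPiece c msb spf) := by
    intro cs
    have : (fun (cs : List Int) f =>
        (PySem.List.pyRange 0 spf 1).foldl (fun cs s =>
          cs ++ [if f = 0 then c + 1 else if f = 1 then s + 1 else msb]) cs)
        = fun cs f => cs ++ pvPiece c msb spf f := by
      funext cs f; exact sample_loop_eq c msb spf f cs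
    rw [this, PySem.List.foldl_append_eq_flatMap]
  calc (PySem.List.pyRange 0 reps 1).foldl (fun cs _r =>
        (PySem.List.pyRange 0 nframes 1).foldl (fun cs f =>
          (PySem.List.pyRange 0 spf 1).foldl (fun cs s =>
            cs ++ [if f = 0 then c + 1 else if f = 1 then s + 1 else msb]) cs) cs) []
      = (PySem.List.pyRange 0 reps 1).foldl
          (fun cs _r => cs ++ (PySem.List.pyRange 0 nframes 1).flatMap (pvPiece c msb spf)) [] := by
        apply PySem.List.foldl_congr_mem
        intro cs f _; exact hframeA cs
    _ = PySem.List.pyRepeat ((PySem.List.pyRange 0 nframes 1).flatMap (pvPiece c msb spf)) reps := by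
        rw [rep_loop_eq]; rfl

lemma flatten_replicate_replicate (k m : Nat) (x : Int) :
    (List.replicate k (List.replicate m x)).flatten = List.replicate (k * m) x := by
  induction k with
  | zero => simp
  | succ k ih =>
      rw [List.replicate_succ, List.flatten_cons, ih, List.replicate_append_replicate,
          Nat.succ_mul, Nat.add_comm]

-- A's flat block equals B's head ++ tail (under the guard's positivity)
lemma block_eq (c msb spf nframes : Int) (hspf : 1 ≤ spf) :
    (PySem.List.pyRange 0 nframes 1).flatMap (pvPiece c msb spf)
    = (if 1 ≤ nframes then PySem.List.pyRepeat [c + 1] spf else [])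
      ++ (if 3 ≤ nframes then
            (if 2 ≤ nframes then ([] : List Int) ++ PySem.List.pyRange 1 (spf + 1) 1 else [])
              ++ PySem.List.pyRepeat [msb] ((nframes - 2) * spf)
          else (if 2 ≤ nframes then ([] : List Int) ++ PySem.List.pyRange 1 (spf + 1) 1 else [])) := by
  by_cases h1 : 1 ≤ nframes
  · by_cases h2 : 2 ≤ nframes
    · by_cases h3 : 3 ≤ nframes
      · rw [PySem.List.pyRange_one_cons (by omega : (0:Int) < nframes),
            PySem.List.pyRange_one_cons (by omega : (0:Int)+1 < nframes)]
        simp only [List.flatMap_cons, if_pos h1, if_pos h2, if_pos h3]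
        have p0 : pvPiece c msb spf 0 = PySem.List.pyRepeat [c + 1] spf := by
          unfold pvPiece; norm_num
        have p1 : pvPiece c msb spf (0+1) = PySem.List.pyRange 1 (spf + 1) 1 := by
          unfold pvPiece; norm_num
        rw [p0, p1]
        simp only [List.nil_append]
        congr 2
        -- remaining: flatMap over frames ≥ 2 equals the MSB fill
        have hmem : (PySem.List.pyRange (0+1+1) nframes 1).flatMap (pvPiece c msb spf)
            = (PySem.List.pyRange (0+1+1) nframes 1).flatMap (fun _ => PySem.List.pyRepeat [msb] spf) := by
          rw [List.flatMap_def, List.flatMap_def]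
          congr 1
          apply List.map_congr_left
          intro f hf
          have := (PySem.List.mem_pyRange_one).1 hf
          unfold pvPiece
          rw [if_neg (by omega), if_neg (by omega)]
        rw [hmem, List.flatMap_def, List.map_const', PySem.List.pyRepeat_singleton,
            PySem.List.pyRepeat_singleton, PySem.List.length_pyRange_one,
            flatten_replicate_replicate]
        congr 1
        exact (Int.toNat_mul (by omega) (by omega)).symm
      · -- nframes = 2
        have hn : nframes = 2 := by omega
        subst hn
        rw [show PySem.List.pyRange 0 2 1 = [0, 1] from by decide,
            if_pos h1, if_pos h2, if_neg (by omega : ¬ (3:Int) ≤ 2)]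
        unfold pvPiece
        norm_num
    · -- nframes = 1
      have hn : nframes = 1 := by omega
      subst hn
      rw [show PySem.List.pyRange 0 1 1 = [0] from by decide,
          if_pos h1, if_neg (by omega : ¬ (3:Int) ≤ 1), if_neg (by omega : ¬ (2:Int) ≤ 1)]
      unfold pvPiece
      norm_num
  · -- nframes ≤ 0
    rw [PySem.List.pyRange_one_eq_nil (by omega), if_neg h1, if_neg (by omega), if_neg (by omega)]
    simp

-- with samples_per_frame ≤ 0 or repeats ≤ 0 each converter row of A is empty
lemma row_empty (c msb spf nframes reps : Int) (h : spf ≤ 0 ∨ reps ≤ 0) :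
    PySem.List.pyRepeat ((PySem.List.pyRange 0 nframes 1).flatMap (pvPiece c msb spf)) reps = [] := by
  rcases h with h | h
  · have hblock : (PySem.List.pyRange 0 nframes 1).flatMap (pvPiece c msb spf) = [] := by
      rw [List.flatMap_def]
      apply List.flatten_eq_nil_iff.2
      intro l hl
      rcases List.mem_map.1 hl with ⟨f, _, rfl⟩
      unfold pvPiece
      split_ifs
      · simp [PySem.List.pyRepeat_singleton, Int.toNat_of_nonpos h]
      · exact PySem.List.pyRange_one_eq_nil (by omega)
      · simp [PySem.List.pyRepeat_singleton, Int.toNat_of_nonpos h]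
    simp [hblock, PySem.List.pyRepeat]
  · simp [PySem.List.pyRepeat, Int.toNat_of_nonpos h]

-- ===== VERDICT (by name: the statement is the Claim_ definition above) =====
theorem long_test_pattern_spec : Claim_equal_long_test_pattern := by
  intro nconverters nbits samples_per_frame frame_per_multiframe repeats _ _
  unfold Spec_long_test_pattern long_test_pattern long_test_pattern_alt
  set nframes := min (max (nconverters * samples_per_frame + 2) 4) frame_per_multiframe with hnf
  set msb : Int := 2 ^ (nbits - 1).toNat with hmsb
  by_cases hg : nconverters ≤ 0 ∨ samples_per_frame ≤ 0 ∨ repeats ≤ 0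
  · rw [if_pos hg]
    rw [PySem.List.foldl_append_singleton_eq_map, List.nil_append]
    rcases hg with h | h | h
    · rw [PySem.List.pyRange_one_eq_nil (by omega : nconverters ≤ 0)]
      simp
    · apply List.map_congr_left
      intro c _
      rw [converter_eq]
      exact row_empty c msb samples_per_frame nframes repeats (Or.inl h)
    · apply List.map_congr_left
      intro c _
      rw [converter_eq]
      exact row_empty c msb samples_per_frame nframes repeats (Or.inr h)
  · rw [if_neg hg]
    push Not at hg
    rw [PySem.List.foldl_append_singleton_eq_map, PySem.List.foldl_append_singleton_eq_map]
    congr 1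
    apply List.map_congr_left
    intro c _
    rw [converter_eq, block_eq c msb samples_per_frame nframes (by omega)]
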